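-- pv_equiv track=rewrite | github.com/stagebo/pycode | tdqs/find_merge.py | get_merge
-- ===== SOURCE A (Python) =====
-- def get_merge(lst):
--     ret = []
--     if len(lst) < 2:
--         return []
--     if lst[0] == lst[1]:
--         ret.append(0)
--     idx = 1
--     while idx < len(lst)-1:
--         if (lst[idx] == lst[idx - 1] and lst[idx] != lst[idx + 1]) or (lst[idx] == lst[idx + 1] and lst[idx] != lst[idx - 1]):
--                 ret.append(idx)
--         idx += 1
--
--     if lst[-1] == lst[-2]:
--         ret.append(len(lst)-1)
--     return ret
-- ===== SOURCE B (Python) =====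
-- def get_merge(lst):
--     if len(lst) < 2:
--         return []
--     # one pass: segment into maximal runs of equal adjacent elements
--     runs = []
--     start = 0
--     prev = lst[0]
--     i = 1
--     for x in lst[1:]:
--         if x != prev:
--             runs.append((start, i - 1))
--             start = i
--         prev = x
--         i += 1
--     runs.append((start, len(lst) - 1))
--     out = []
--     for s, e in runs:
--         if e > s:
--             out.append(s)
--             out.append(e)
--     return out
-- ===== Notes on version B (the rewrite author's own statement) =====
-- stated objective: alternative
-- what changed: Instead of testing each index's three-neighbour xor condition, B segments the list in one pass into maximal runs (start,end) and then emits start and end of every run of length >= 2.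
import Mathlib
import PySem

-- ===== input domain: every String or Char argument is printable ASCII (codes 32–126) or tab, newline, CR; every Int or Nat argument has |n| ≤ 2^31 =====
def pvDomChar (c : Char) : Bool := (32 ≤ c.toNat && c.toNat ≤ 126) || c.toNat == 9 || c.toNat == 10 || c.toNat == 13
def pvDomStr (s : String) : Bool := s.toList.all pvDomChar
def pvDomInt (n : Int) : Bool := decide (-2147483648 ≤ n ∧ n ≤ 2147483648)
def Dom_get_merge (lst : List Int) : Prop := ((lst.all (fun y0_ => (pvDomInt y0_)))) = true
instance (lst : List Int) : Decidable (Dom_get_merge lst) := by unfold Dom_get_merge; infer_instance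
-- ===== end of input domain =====

-- B replaces A's per-index three-neighbour boundary test by a one-pass segmentation into maximal
-- runs (start,end), emitting start and end of every run of length >= 2 (alternative decomposition).


-- ===== PORT A =====
-- every index A reads is in range once lst.length ≥ 2, so pyGetD lst · 0 is exact (Python never raises here)
def get_merge (lst : List Int) : List Int :=
  if lst.length < 2 then []
  else
    let ret : List Int := if PySem.List.pyGetD lst 0 0 = PySem.List.pyGetD lst 1 0 then [0] else []
    let ret := (PySem.List.pyRange 1 ((lst.length : Int) - 1) 1).foldl
      (fun ret idx =>
        if (PySem.List.pyGetD lst idx 0 = PySem.List.pyGetD lst (idx - 1) 0 ∧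
              PySem.List.pyGetD lst idx 0 ≠ PySem.List.pyGetD lst (idx + 1) 0) ∨
           (PySem.List.pyGetD lst idx 0 = PySem.List.pyGetD lst (idx + 1) 0 ∧
              PySem.List.pyGetD lst idx 0 ≠ PySem.List.pyGetD lst (idx - 1) 0)
        then ret ++ [idx] else ret) ret
    if PySem.List.pyGetD lst (-1) 0 = PySem.List.pyGetD lst (-2) 0 then ret ++ [(lst.length : Int) - 1]
    else ret

-- ===== PORT B =====
-- state of Source B's first loop: (runs, start, prev, i)
def get_merge_alt (lst : List Int) : List Int :=
  if lst.length < 2 then []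
  else
    let st := (PySem.List.slice lst (some 1) none).foldl
      (fun (st : List (Int × Int) × Int × Int × Int) x =>
        if x ≠ st.2.2.1 then (st.1 ++ [(st.2.1, st.2.2.2 - 1)], st.2.2.2, x, st.2.2.2 + 1)
        else (st.1, st.2.1, x, st.2.2.2 + 1))
      ([], 0, PySem.List.pyGetD lst 0 0, 1)
    let runs := st.1 ++ [(st.2.1, (lst.length : Int) - 1)]
    runs.foldl (fun out se => if se.2 > se.1 then out ++ [se.1, se.2] else out) []

-- ===== PRECONDITION & SPEC =====
def Spec_get_merge (lst : List Int) (out : List Int) : Prop := out = get_merge_alt lst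
instance (lst : List Int) (out : List Int) : Decidable (Spec_get_merge lst out) := by unfold Spec_get_merge; infer_instance

-- ===== CLAIM (what is proved, stated in full; the proofs are below) =====
def Claim_equal_get_merge : Prop := ∀ (lst : List Int), Dom_get_merge lst → Spec_get_merge lst (get_merge lst)

-- ===== LEMMAS AND PROOFS =====

-- A's middle/tail emission, read structurally: Arec i prev xs walks xs (whose first element sits at
-- absolute index i, prev at i-1), emitting the while-loop's xor condition at interior indices and
-- A's final lst[-1]==lst[-2] test at the last index.
def Arec (i prev : Int) : List Int → List Int
  | [] => []
  | [y] => if y = prev then [i] else []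
  | y :: z :: ys =>
      (if (y = prev ∧ y ≠ z) ∨ (y = z ∧ y ≠ prev) then [i] else []) ++ Arec (i + 1) y (z :: ys)

-- the run list Source B's first loop builds, as a recursion
def runsRec (start i prev : Int) : List Int → List (Int × Int)
  | [] => [(start, i - 1)]
  | y :: ys => if y ≠ prev then (start, i - 1) :: runsRec i (i + 1) y ys
               else runsRec start (i + 1) y ys

-- emission of Source B's second loop
def Em (runs : List (Int × Int)) : List Int :=
  runs.flatMap (fun se => if se.2 > se.1 then [se.1, se.2] else [])

-- pending emission of the currently open run (start s, last seen index i-1, value prev)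
def pend (s i prev : Int) : List Int → List Int
  | [] => if s < i - 1 then [s, i - 1] else []
  | y :: _ => if y = prev then [s] else if s < i - 1 then [s, i - 1] else []

theorem em_foldl (runs : List (Int × Int)) (acc : List Int) :
    runs.foldl (fun out se => if se.2 > se.1 then out ++ [se.1, se.2] else out) acc
      = acc ++ Em runs := by
  induction runs generalizing acc with
  | nil => simp [Em]
  | cons r rs ih => simp only [List.foldl_cons, ih, Em, List.flatMap_cons]; split_ifs <;> simp

-- pulling a conditional append out of an if (used to reshape A's final branch)
theorem ite_append (c : Prop) [Decidable c] (u v : List Int) :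
    (if c then u ++ v else u) = u ++ (if c then v else []) := by
  split_ifs <;> simp

theorem foldB (xs : List Int) (runs : List (Int × Int)) (start prev i : Int) :
    (xs.foldl
      (fun (st : List (Int × Int) × Int × Int × Int) x =>
        if x ≠ st.2.2.1 then (st.1 ++ [(st.2.1, st.2.2.2 - 1)], st.2.2.2, x, st.2.2.2 + 1)
        else (st.1, st.2.1, x, st.2.2.2 + 1))
      (runs, start, prev, i)).1
    ++ [((xs.foldl
      (fun (st : List (Int × Int) × Int × Int × Int) x =>
        if x ≠ st.2.2.1 then (st.1 ++ [(st.2.1, st.2.2.2 - 1)], st.2.2.2, x, st.2.2.2 + 1)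
        else (st.1, st.2.1, x, st.2.2.2 + 1))
      (runs, start, prev, i)).2.1, i + (xs.length : Int) - 1)]
    = runs ++ runsRec start i prev xs := by
  induction xs generalizing runs start prev i with
  | nil => simp [runsRec]
  | cons x xs ih =>
    simp only [List.foldl_cons]
    push_cast [List.length_cons]
    by_cases hx : x = prev
    · rw [if_neg (by simp [hx]),
        show i + ((xs.length : Int) + 1) - 1 = (i + 1) + (xs.length : Int) - 1 by ring,
        ih runs start x (i + 1)]
      simp [runsRec, hx]
    · rw [if_pos hx,
        show i + ((xs.length : Int) + 1) - 1 = (i + 1) + (xs.length : Int) - 1 by ring,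
        ih (runs ++ [(start, i - 1)]) i x (i + 1)]
      simp [runsRec, hx]

theorem runs_emit (xs : List Int) : ∀ (s i prev : Int), s ≤ i - 1 →
    Em (runsRec s i prev xs) = pend s i prev xs ++ Arec i prev xs := by
  induction xs with
  | nil => intro s i prev h; simp [runsRec, Em, pend, Arec]
  | cons y ys ih =>
    intro s i prev h
    by_cases hy : y = prev
    · subst hy
      have hrec : runsRec s i y (y :: ys) = runsRec s (i + 1) y ys := by simp [runsRec]
      rw [hrec, ih s (i + 1) y (by omega)]
      have h2 : s < i := by omega
      cases ys with
      | nil => simp [pend, Arec, h2, show i + 1 - 1 = i from by ring]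
      | cons z zs =>
        by_cases hz : z = y
        · simp [pend, Arec, hz]
        · have hz' : ¬ y = z := fun hc => hz hc.symm
          simp [pend, Arec, hz, hz', h2, show i + 1 - 1 = i from by ring]
    · have hrec : runsRec s i prev (y :: ys) = (s, i - 1) :: runsRec i (i + 1) y ys := by
        simp [runsRec, hy]
      rw [hrec]
      have hEm : Em ((s, i - 1) :: runsRec i (i + 1) y ys)
          = (if s < i - 1 then [s, i - 1] else []) ++ Em (runsRec i (i + 1) y ys) := by
        simp only [Em, List.flatMap_cons]
      rw [hEm, ih i (i + 1) y (by omega)]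
      cases ys with
      | nil => simp [pend, Arec, hy, show i + 1 - 1 = i from by ring]
      | cons z zs =>
        by_cases hz : y = z
        · have hzp : ¬ z = prev := fun hc => hy (hz.trans hc)
          simp [pend, Arec, hz, hzp]
        · have hz' : ¬ z = y := fun hc => hz hc.symm
          simp [pend, Arec, hy, hz, hz', show i + 1 - 1 = i from by ring]

-- A's index loop (plus its final tail test) equals Arec over the corresponding suffix
theorem abridge (lst : List Int) (k : Nat) :
    ∀ (j : Nat) (acc : List Int), 1 ≤ j → j + k = lst.length - 1 → 2 ≤ lst.length →
    ((PySem.List.pyRange (j : Int) ((lst.length : Int) - 1) 1).foldl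
      (fun ret idx =>
        if (PySem.List.pyGetD lst idx 0 = PySem.List.pyGetD lst (idx - 1) 0 ∧
              PySem.List.pyGetD lst idx 0 ≠ PySem.List.pyGetD lst (idx + 1) 0) ∨
           (PySem.List.pyGetD lst idx 0 = PySem.List.pyGetD lst (idx + 1) 0 ∧
              PySem.List.pyGetD lst idx 0 ≠ PySem.List.pyGetD lst (idx - 1) 0)
        then ret ++ [idx] else ret) acc)
      ++ (if lst.getD (lst.length - 1) 0 = lst.getD (lst.length - 2) 0
          then [((lst.length : Int)) - 1] else [])
      = acc ++ Arec (j : Int) (lst.getD (j - 1) 0) (lst.drop j) := by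
  induction k with
  | zero =>
    intro j acc hj hjk hn
    have hj' : j = lst.length - 1 := by omega
    have hlt : j < lst.length := by omega
    have hrange : PySem.List.pyRange (j : Int) ((lst.length : Int) - 1) 1 = [] := by
      apply PySem.List.pyRange_one_eq_nil; omega
    rw [hrange]
    have hdrop : lst.drop j = [lst.getD j 0] := by
      rw [List.drop_eq_getElem_cons hlt]
      have h2 : lst.drop (j + 1) = [] := by apply List.drop_eq_nil_of_le; omega
      rw [h2, List.getD_eq_getElem lst 0 hlt]
    rw [hdrop]
    simp only [List.foldl_nil, Arec]
    have e1 : lst.length - 1 = j := hj'.symm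
    have e2 : lst.length - 2 = j - 1 := by omega
    have e3 : ((lst.length : Int)) - 1 = (j : Int) := by omega
    rw [e1, e2, e3]
  | succ k ih =>
    intro j acc hj hjk hn
    have hjlt : j < lst.length - 1 := by omega
    have hcons : PySem.List.pyRange (j : Int) ((lst.length : Int) - 1) 1
        = (j : Int) :: PySem.List.pyRange ((j : Int) + 1) ((lst.length : Int) - 1) 1 := by
      apply PySem.List.pyRange_one_cons; omega
    rw [hcons, List.foldl_cons]
    have hcast : ((j : Int) + 1) = (((j + 1 : Nat)) : Int) := by push_cast; ring
    rw [hcast, ih (j + 1) _ (by omega) (by omega) hn]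
    have hg : ∀ (m : Nat), PySem.List.pyGetD lst (m : Int) 0 = lst.getD m 0 :=
      fun m => PySem.List.pyGetD_natCast lst m 0
    have hm1 : (j : Int) - 1 = (((j - 1 : Nat)) : Int) := by omega
    rw [hm1, hg, hg, hg]
    simp only [Nat.add_sub_cancel]
    have hlt1 : j < lst.length := by omega
    have hlt2 : j + 1 < lst.length := by omega
    have hd1 : lst.drop j = lst.getD j 0 :: lst.drop (j + 1) := by
      rw [List.drop_eq_getElem_cons hlt1, List.getD_eq_getElem lst 0 hlt1]
    have hd2 : lst.drop (j + 1) = lst.getD (j + 1) 0 :: lst.drop (j + 2) := by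
      rw [List.drop_eq_getElem_cons hlt2, List.getD_eq_getElem lst 0 hlt2]
    rw [hd1, hd2]
    have harec : Arec (j : Int) (lst.getD (j - 1) 0)
        (lst.getD j 0 :: lst.getD (j + 1) 0 :: lst.drop (j + 2))
        = (if (lst.getD j 0 = lst.getD (j - 1) 0 ∧ lst.getD j 0 ≠ lst.getD (j + 1) 0) ∨
              (lst.getD j 0 = lst.getD (j + 1) 0 ∧ lst.getD j 0 ≠ lst.getD (j - 1) 0)
           then [(j : Int)] else [])
          ++ Arec ((j : Int) + 1) (lst.getD j 0) (lst.getD (j + 1) 0 :: lst.drop (j + 2)) := by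
      simp [Arec]
    rw [harec, hcast]
    split_ifs <;> simp [List.append_assoc]

-- ===== VERDICT (by name: the statement is the Claim_ definition above) =====
theorem get_merge_spec : Claim_equal_get_merge := by
  intro lst _
  unfold Spec_get_merge get_merge get_merge_alt
  by_cases hn : lst.length < 2
  · rw [if_pos hn, if_pos hn]
  · rw [if_neg hn, if_neg hn]
    obtain ⟨h, y, t, rfl⟩ : ∃ h y t, lst = h :: y :: t := by
      cases lst with
      | nil => exact absurd (by simp) hn
      | cons a l =>
        cases l with
        | nil => exact absurd (by simp) hn
        | cons b t => exact ⟨a, b, t, rfl⟩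
    dsimp only
    have hgz : PySem.List.pyGetD (h :: y :: t) 0 0 = h := PySem.List.pyGetD_zero_cons _ _ _
    have hg1 : PySem.List.pyGetD (h :: y :: t) 1 0 = y := by
      simp [PySem.List.pyGetD, PySem.List.pyGet?, PySem.List.pyIdx?]
    rw [hgz]
    -- ===== A side =====
    rw [PySem.List.pyGetD_neg_ofNat (h :: y :: t) 1 0 (by omega) (by simp),
        PySem.List.pyGetD_neg_ofNat (h :: y :: t) 2 0 (by omega) (by simp),
        ← List.getD_eq_getElem (h :: y :: t) 0, ← List.getD_eq_getElem (h :: y :: t) 0,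
        ite_append]
    have habridge := abridge (h :: y :: t) ((h :: y :: t).length - 2) 1
      (if h = PySem.List.pyGetD (h :: y :: t) 1 0 then [0] else [])
      (le_refl 1) (by simp; omega) (by simp)
    simp only [Nat.cast_one] at habridge
    rw [habridge]
    simp only [show (1 : Nat) - 1 = 0 from rfl, List.getD_cons_zero, List.drop_succ_cons,
      List.drop_zero, hg1]
    -- ===== B side =====
    rw [PySem.List.slice_from_one, em_foldl]
    have hend : (1 : Int) + (((y :: t).length : Int)) - 1 = (((h :: y :: t).length : Int)) - 1 := by
      push_cast [List.length_cons]; ring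
    rw [List.tail_cons, ← hend, foldB (y :: t) [] 0 h 1]
    simp only [List.nil_append]
    rw [runs_emit (y :: t) 0 1 h (by omega)]
    have hpend : pend 0 1 h (y :: t) = if y = h then [0] else [] := by
      simp [pend]
    rw [hpend]
    by_cases hhy : h = y
    · simp [hhy]
    · have h2 : ¬ y = h := fun hc => hhy hc.symm
      simp [hhy, h2]
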